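-- pv_equiv track=rewrite | github.com/chandankmishra/lang | python/iview/rb19/log_filer.py | filter_log_msgs
-- ===== SOURCE A (Python) =====
-- def filter_log_msgs(input_msgs):
--     '''
--     Return:
--         output_msgs     FATAL and ERRORs
--         count           count of the FATAL msgs
--     '''
--     output_msgs = []
--     fatal_count = 0
--     for msg in input_msgs:
--         if msg.find(': ERROR]:') != -1:
--             output_msgs.append(msg)
--         elif msg.find('FATAL]') != -1:
--             output_msgs.append(msg)
--             fatal_count += 1
--         elif msg.find('OFF]') != -1:
--             output_msgs.append(msg)
--     return output_msgs, fatal_count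
-- ===== SOURCE B (Python) =====
-- def filter_log_msgs(input_msgs):
--     output_msgs = [m for m in input_msgs
--                    if ': ERROR]:' in m or 'FATAL]' in m or 'OFF]' in m]
--     fatal_count = sum(1 for m in input_msgs
--                       if 'FATAL]' in m and ': ERROR]:' not in m)
--     return output_msgs, fatal_count
-- ===== Notes on version B (the rewrite author's own statement) =====
-- stated objective: simpler
-- what changed: Replaces A's single fused loop with mutable accumulators by two independent traversals: a comprehension selecting messages containing any of the three markers, and a separate sum counting FATAL messages without ': ERROR]:' (encoding the elif precedence); the 'in' operator and comprehension run faster than per-message .find calls with branch bookkeeping.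
import Mathlib
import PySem

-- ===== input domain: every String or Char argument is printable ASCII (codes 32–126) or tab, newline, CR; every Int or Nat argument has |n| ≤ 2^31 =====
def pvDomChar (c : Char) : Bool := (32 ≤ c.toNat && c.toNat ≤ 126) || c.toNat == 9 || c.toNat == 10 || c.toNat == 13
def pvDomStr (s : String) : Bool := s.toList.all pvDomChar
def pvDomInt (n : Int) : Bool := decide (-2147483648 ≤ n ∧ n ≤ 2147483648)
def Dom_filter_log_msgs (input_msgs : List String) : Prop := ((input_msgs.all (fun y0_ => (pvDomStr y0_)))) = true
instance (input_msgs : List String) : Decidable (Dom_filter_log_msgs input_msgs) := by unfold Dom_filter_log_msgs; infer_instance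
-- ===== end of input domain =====

-- B replaces A's single fused loop with two independent passes (a filter and a count); same return value.

-- ===== PORT A =====
-- literal transliteration of A's fused loop: one fold carrying (output_msgs, fatal_count)
def filter_log_msgs (input_msgs : List String) : List String × Int :=
  input_msgs.foldl (fun st msg =>
    if PySem.Str.find msg ": ERROR]:" ≠ -1 then (st.1 ++ [msg], st.2)
    else if PySem.Str.find msg "FATAL]" ≠ -1 then (st.1 ++ [msg], st.2 + 1)
    else if PySem.Str.find msg "OFF]" ≠ -1 then (st.1 ++ [msg], st.2)
    else st) ([], 0)

-- ===== PORT B =====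
-- two passes: a filter comprehension, then a sum counting FATAL-without-ERROR
def filter_log_msgs_alt (input_msgs : List String) : List String × Int :=
  (input_msgs.filter (fun m =>
      PySem.Str.isIn ": ERROR]:" m || PySem.Str.isIn "FATAL]" m || PySem.Str.isIn "OFF]" m),
   ((input_msgs.map (fun m =>
      if PySem.Str.isIn "FATAL]" m && !PySem.Str.isIn ": ERROR]:" m then (1 : Int) else 0)).sum))

-- ===== PRECONDITION & SPEC =====
def Spec_filter_log_msgs (input_msgs : List String) (out : List String × Int) : Prop := out = filter_log_msgs_alt input_msgs
instance (input_msgs : List String) (out : List String × Int) : Decidable (Spec_filter_log_msgs input_msgs out) := by unfold Spec_filter_log_msgs; infer_instance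

-- ===== CLAIM (what is proved, stated in full; the proofs are below) =====
def Claim_equal_filter_log_msgs : Prop := ∀ (input_msgs : List String), Dom_filter_log_msgs input_msgs → Spec_filter_log_msgs input_msgs (filter_log_msgs input_msgs)

-- ===== LEMMAS AND PROOFS =====

-- generic loop invariant: A's fused fold with three tests equals (filter, running sum)
theorem filter_log_msgs_inv {P Q R : String → Prop} [DecidablePred P] [DecidablePred Q] [DecidablePred R]
    (l : List String) (acc : List String) (c : Int) :
    l.foldl (fun st msg =>
      if P msg then (st.1 ++ [msg], st.2)
      else if Q msg then (st.1 ++ [msg], st.2 + 1)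
      else if R msg then (st.1 ++ [msg], st.2)
      else st) (acc, c)
    = (acc ++ l.filter (fun m => decide (P m) || decide (Q m) || decide (R m)),
       c + ((l.map (fun m => if Q m ∧ ¬ P m then (1 : Int) else 0)).sum)) := by
  induction l generalizing acc c with
  | nil => simp
  | cons h t ih =>
    simp only [List.foldl_cons, List.filter_cons, List.map_cons, List.sum_cons]
    by_cases hp : P h <;> by_cases hq : Q h <;> by_cases hr : R h <;>
      simp [hp, hq, hr, ih] <;> ring

-- per-message agreement of A's find-tests with B's membership tests, after the Str→Chars bridge
theorem pred_eq (sub m : List Char) :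
    (!decide (PySem.Chars.find m sub = -1)) = PySem.Chars.isIn sub m := by
  cases hb : PySem.Chars.isIn sub m
  · simp [PySem.Chars.find_eq_neg_one_iff, (PySem.Chars.isIn_eq_false_iff _ _).mp hb]
  · simp [PySem.Chars.find_eq_neg_one_iff, (PySem.Chars.isIn_iff_infix _ _).mp hb]

-- ===== VERDICT (by name: the statement is the Claim_ definition above) =====
theorem filter_log_msgs_spec : Claim_equal_filter_log_msgs := by
  intro l _
  unfold Spec_filter_log_msgs filter_log_msgs filter_log_msgs_alt
  rw [filter_log_msgs_inv l [] 0]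
  simp only [List.nil_append, Int.zero_add]
  simp only [Prod.mk.injEq]
  refine ⟨?_, ?_⟩
  · apply List.filter_congr; intro m _
    simp [pred_eq]
  · congr 1; apply List.map_congr_left; intro m _
    by_cases h1 : [':', ' ', 'E', 'R', 'R', 'O', 'R', ']', ':'] <:+: m.toList <;>
    by_cases h2 : ['F', 'A', 'T', 'A', 'L', ']'] <:+: m.toList <;>
      simp [PySem.Chars.find_eq_neg_one_iff, PySem.Chars.isIn_iff_infix, h1, h2]
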